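-- pv_equiv track=rewrite | github.com/OndrejSlamecka/iv122 | assets/counting/comb.py | var
-- ===== SOURCE A (Python) =====
-- def var(l, k, repetitions = False):
--     if k == 0: return [[]]
--
--     r = []
--     for i in l:
--         nl = l[:]
--         if not repetitions:
--             nl.remove(i)
--
--         for v in var(nl, k-1, repetitions):
--             r.append([i] + v)
--
--     return r
-- ===== SOURCE B (Python) =====
-- def var(l, k, repetitions=False):
--     # Iterative level-order builder instead of recursion: a worklist of
--     # (prefix, remaining) pairs, where prefix is a shared linked chain
--     # (None, or a (value, parent) cell) materialized only at the end.
--     # Without repetition a pair needs one element per remaining round, so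
--     # pairs with too-short `remaining` are dropped early.
--     work = [(None, list(l))]
--     rem = k
--     for _ in range(k):
--         if not repetitions:
--             work = [pr for pr in work if len(pr[1]) >= rem]
--         if not work:
--             break
--         nxt = []
--         for node, remaining in work:
--             for i in remaining:
--                 if repetitions:
--                     rest = remaining
--                 else:
--                     rest = remaining[:]
--                     rest.remove(i)
--                 nxt.append(((i, node), rest))
--         work = nxt
--         rem -= 1
--     out = []
--     for node, _ in work:
--         p = []
--         while node is not None:
--             p.append(node[0])
--             node = node[1]
--         p.reverse()
--         out.append(p)
--     return out
-- ===== Notes on version B (the rewrite author's own statement) =====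
-- stated objective: alternative
-- what changed: Replaces the recursion with an iterative level-order builder: a worklist of (prefix-chain, remaining) pairs expanded k rounds (with early drop of pairs whose remaining list cannot fill the rounds left), prefixes materialized from shared linked cells at the end.
-- outside the precondition, e.g. on var([], -1, False): A returns [], B returns [[]]
import Mathlib
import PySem

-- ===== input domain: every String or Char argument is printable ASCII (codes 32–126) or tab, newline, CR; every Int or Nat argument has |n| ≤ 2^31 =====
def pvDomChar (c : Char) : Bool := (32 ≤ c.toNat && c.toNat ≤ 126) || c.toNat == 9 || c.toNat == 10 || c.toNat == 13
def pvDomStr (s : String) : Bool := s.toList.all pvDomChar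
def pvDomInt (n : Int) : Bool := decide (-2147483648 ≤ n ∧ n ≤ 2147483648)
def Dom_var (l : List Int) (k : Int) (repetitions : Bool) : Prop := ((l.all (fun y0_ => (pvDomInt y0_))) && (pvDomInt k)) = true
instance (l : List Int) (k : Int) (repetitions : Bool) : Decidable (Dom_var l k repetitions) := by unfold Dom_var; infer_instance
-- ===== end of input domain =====

-- ===== PORT A =====
-- A's recursion on k, ported with the non-negative depth k.toNat (Python A raises
-- RecursionError for k < 0 with l ≠ []; those inputs lie outside Pre_var below).
-- 'nl.remove(i)' with i drawn from l always finds i, so it is exactly List.erase.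
def varAux (n : Nat) (l : List Int) (repetitions : Bool) : List (List Int) :=
  match n with
  | 0 => [[]]
  | Nat.succ m =>
    l.foldl (fun r i =>
      r ++ (varAux m (if repetitions then l else l.erase i) repetitions).map (fun v => i :: v)) []

def var (l : List Int) (k : Int) (repetitions : Bool) : List (List Int) :=
  varAux k.toNat l repetitions

-- ===== PORT B =====
-- B: iterative level-order builder over a worklist of (prefix, remaining) pairs;
-- the Python prefix chain None / (value, parent) is the Lean list [] / value :: parent,
-- i.e. the prefix stored in reverse; pairs too short to survive the remaining rounds
-- are dropped, and the loop breaks once the worklist is empty.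
def varStep (repetitions : Bool) (work : List (List Int × List Int)) : List (List Int × List Int) :=
  work.foldl (fun nxt pr =>
    nxt ++ pr.2.foldl (fun a i =>
      a ++ [(i :: pr.1, if repetitions then pr.2 else pr.2.erase i)]) []) []

-- the Python "for _ in range(k)" with the decrementing counter rem: here n is rem,
-- counting the rounds still to run
def varRounds (repetitions : Bool) : Nat → List (List Int × List Int) → List (List Int × List Int)
  | 0, work => work
  | Nat.succ n, work =>
    let w := if repetitions then work else work.filter (fun pr => n + 1 ≤ pr.2.length)
    if w = [] then w
    else varRounds repetitions n (varStep repetitions w)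

-- range(k) in Python is empty for k < 0, hence k.toNat rounds is exact
def var_alt (l : List Int) (k : Int) (repetitions : Bool) : List (List Int) :=
  (varRounds repetitions k.toNat [([], l)]).map (fun pr => pr.1.reverse)

-- ===== PRECONDITION & SPEC =====
-- Pre_var excludes k < 0: there Python A raises RecursionError whenever l ≠ [], and for
-- l = [] A's empty loop accidentally returns [] where B's empty range(k) returns [[]] —
-- a degenerate corner nobody specifies (see cites).
def Pre_var (l : List Int) (k : Int) (repetitions : Bool) : Prop := 0 ≤ k
instance (l : List Int) (k : Int) (repetitions : Bool) : Decidable (Pre_var l k repetitions) := by unfold Pre_var; infer_instance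

def pvWitness_var : List Int × Int × Bool := ([1, 2, 3], 2, false)

def Spec_var (l : List Int) (k : Int) (repetitions : Bool) (out : List (List Int)) : Prop := out = var_alt l k repetitions
instance (l : List Int) (k : Int) (repetitions : Bool) (out : List (List Int)) : Decidable (Spec_var l k repetitions out) := by unfold Spec_var; infer_instance

-- ===== CLAIM (what is proved, stated in full; the proofs are below) =====
def Claim_equal_var : Prop := ∀ (l : List Int) (k : Int) (repetitions : Bool), Dom_var l k repetitions → Pre_var l k repetitions → Spec_var l k repetitions (var l k repetitions)

-- ===== LEMMAS AND PROOFS =====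

theorem flatten_map_singleton {A B : Type} (f : A -> B) (xs : List A) :
    (xs.map (fun i => [f i])).flatten = xs.map f := by
  induction xs with
  | nil => simp
  | cons x xs ih => simp [ih]

-- one round of the worklist, written as flatMap
theorem varStep_eq (repetitions : Bool) (work : List (List Int × List Int)) :
    varStep repetitions work =
      work.flatMap (fun pr =>
        pr.2.map (fun i => (i :: pr.1, if repetitions then pr.2 else pr.2.erase i))) := by
  simp [varStep, List.flatMap_def, flatten_map_singleton]

-- A's recursion, written as flatMap
theorem varAux_succ (m : Nat) (l : List Int) (repetitions : Bool) :
    varAux (m + 1) l repetitions =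
      l.flatMap (fun i =>
        (varAux m (if repetitions then l else l.erase i) repetitions).map (fun v => i :: v)) := by
  simp [varAux, List.flatMap_def]

-- without repetition a list shorter than the requested length yields no variations
theorem varAux_nil_of_short (n : Nat) :
    ∀ l : List Int, l.length < n → varAux n l false = [] := by
  induction n with
  | zero => intro l h; omega
  | succ m ih =>
    intro l h
    rw [varAux_succ]
    rw [List.flatMap_eq_nil_iff.mpr]
    intro i hi
    simp only [Bool.false_eq_true, if_false]
    rw [ih (l.erase i) ?_, List.map_nil]
    have h1 : 1 ≤ l.length := List.length_pos_of_mem hi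
    rw [List.length_erase_of_mem hi]
    omega

-- dropping elements whose contribution is empty does not change a flatMap
theorem flatMap_filter_of_nil {A B : Type} (p : A → Bool) (f : A → List B) (l : List A)
    (h : ∀ x ∈ l, p x = false → f x = []) :
    (l.filter p).flatMap f = l.flatMap f := by
  induction l with
  | nil => simp
  | cons x xs ih =>
    have ih' := ih (fun y hy => h y (List.mem_cons_of_mem x hy))
    by_cases hp : p x = true
    · simp [List.filter_cons, hp, ih']
    · simp only [Bool.not_eq_true] at hp
      simp [List.filter_cons, hp, ih', h x (List.mem_cons_self) hp]

-- the worklist invariant: after n rounds the materialized prefixes are A's variations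
theorem varRounds_map_rev (repetitions : Bool) (n : Nat) :
    ∀ work : List (List Int × List Int),
      (varRounds repetitions n work).map (fun pr => pr.1.reverse) =
        work.flatMap (fun pr => (varAux n pr.2 repetitions).map (fun v => pr.1.reverse ++ v)) := by
  induction n with
  | zero =>
    intro work
    simp [varRounds, varAux, List.map_eq_flatMap]
  | succ m ih =>
    intro work
    rw [varRounds]
    have hfil :
        work.flatMap (fun pr => (varAux (m + 1) pr.2 repetitions).map (fun v => pr.1.reverse ++ v)) =
          (if repetitions then work else work.filter (fun pr => m + 1 ≤ pr.2.length)).flatMap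
            (fun pr => (varAux (m + 1) pr.2 repetitions).map (fun v => pr.1.reverse ++ v)) := by
      cases repetitions with
      | true => simp
      | false =>
        simp only [Bool.false_eq_true, if_false]
        rw [flatMap_filter_of_nil]
        intro pr _ hp
        simp only [decide_eq_false_iff_not, not_le] at hp
        rw [varAux_nil_of_short (m + 1) pr.2 hp, List.map_nil]
    rw [hfil]
    set w := if repetitions then work else work.filter (fun pr => m + 1 ≤ pr.2.length) with hw
    by_cases hnil : w = []
    · simp [hnil]
    · rw [if_neg hnil, ih, varStep_eq]
      rw [List.flatMap_assoc]
      congr 1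
      funext pr
      rw [varAux_succ, List.map_flatMap, List.flatMap_map]
      congr 1
      funext i
      simp

-- ===== VERDICT (by name: the statement is the Claim_ definition above) =====
theorem var_spec : Claim_equal_var := by
  intro l k repetitions _ _
  unfold Spec_var var var_alt
  rw [varRounds_map_rev]
  simp
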